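-- pv_equiv track=rewrite | github.com/GuiBritx/Exercicios-CI-T | ex4ci&t.py | calcula_top_ocorrencias_de_queries
-- ===== SOURCE A (Python) =====
-- def calcula_top_ocorrencias_de_queries(texto,queries,k):
--     ocorrencias = {}
--     resultado = []
--     for i in queries:
--       seila = texto.count(i)
--       ocorrencias[i] = seila
--     oco2 = list(sorted(ocorrencias, key = ocorrencias.get, reverse=True))
--     return (oco2[0:k])
-- ===== SOURCE B (Python) =====
-- def calcula_top_ocorrencias_de_queries(texto, queries, k):
--     # counting sort by occurrence count (counts are bounded by len(texto)+1),
--     # over the first-occurrence-deduplicated queries; no dict, no comparison sort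
--     distinct = list(dict.fromkeys(queries))
--     n = len(texto)
--     buckets = [[] for _ in range(n + 2)]
--     for q in distinct:
--         buckets[texto.count(q)].append(q)
--     resultado = []
--     for b in reversed(buckets):
--         resultado.extend(b)
--     return resultado[:k]
-- ===== Notes on version B (the rewrite author's own statement) =====
-- stated objective: alternative
-- what changed: B replaces A's dict construction plus stable comparison sort of the keys by an ordered dedup of the queries and a counting sort into occurrence-count buckets (counts are bounded by len(texto)+1), concatenated from the highest bucket down.
import Mathlib
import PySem

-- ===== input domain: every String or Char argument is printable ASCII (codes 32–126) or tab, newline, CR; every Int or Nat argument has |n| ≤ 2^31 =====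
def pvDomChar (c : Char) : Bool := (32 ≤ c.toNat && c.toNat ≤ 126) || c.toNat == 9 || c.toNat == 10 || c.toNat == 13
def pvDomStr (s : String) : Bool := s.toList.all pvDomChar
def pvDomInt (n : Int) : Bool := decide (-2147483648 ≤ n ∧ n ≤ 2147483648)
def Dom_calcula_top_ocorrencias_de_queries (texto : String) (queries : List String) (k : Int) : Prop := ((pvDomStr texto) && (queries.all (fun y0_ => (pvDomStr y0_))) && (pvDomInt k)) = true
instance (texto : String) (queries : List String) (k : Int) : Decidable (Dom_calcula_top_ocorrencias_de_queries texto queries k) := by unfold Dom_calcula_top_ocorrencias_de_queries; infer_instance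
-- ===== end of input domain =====

-- B replaces A's dict + comparison sort by an ordered dedup plus a counting sort over
-- occurrence buckets (counts are bounded by len(texto)+1); same results, alternative algorithm.

-- ===== PORT A =====
-- 'resultado = []' in A is dead code and is not ported.
-- 'key = ocorrencias.get' never misses (it is applied to the dict's own keys): ported as getD _ 0.
def calcula_top_ocorrencias_de_queries (texto : String) (queries : List String) (k : Int) : List String :=
  let ocorrencias : PySem.Dict String Int :=
    queries.foldl (fun d i => d.insert i ((PySem.Str.count texto i : Int))) PySem.Dict.empty
  let oco2 := PySem.List.sorted ocorrencias.keys (fun i => ocorrencias.getD i 0) true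
  PySem.List.slice oco2 (some 0) (some k)

-- ===== PORT B =====
def calcula_top_ocorrencias_de_queries_alt (texto : String) (queries : List String) (k : Int) : List String :=
  let distinct := PySem.List.dedup queries
  let n := texto.toList.length
  let buckets0 : List (List String) := List.replicate (n + 2) []
  let buckets := distinct.foldl
    (fun bs q => bs.set (PySem.Str.count texto q) (bs.getD (PySem.Str.count texto q) [] ++ [q]))
    buckets0
  let resultado := buckets.reverse.foldl (fun acc b => acc ++ b) []
  PySem.List.slice resultado (some 0) (some k)

-- ===== PRECONDITION & SPEC =====
def Spec_calcula_top_ocorrencias_de_queries (texto : String) (queries : List String) (k : Int) (out : List String) : Prop := out = calcula_top_ocorrencias_de_queries_alt texto queries k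
instance (texto : String) (queries : List String) (k : Int) (out : List String) : Decidable (Spec_calcula_top_ocorrencias_de_queries texto queries k out) := by unfold Spec_calcula_top_ocorrencias_de_queries; infer_instance

-- ===== CLAIM (what is proved, stated in full; the proofs are below) =====
def Claim_equal_calcula_top_ocorrencias_de_queries : Prop := ∀ (texto : String) (queries : List String) (k : Int), Dom_calcula_top_ocorrencias_de_queries texto queries k → Spec_calcula_top_ocorrencias_de_queries texto queries k (calcula_top_ocorrencias_de_queries texto queries k)

-- ===== LEMMAS AND PROOFS =====

theorem pv_count_go_le (sub : List Char) (fuel : Nat) (l : List Char) (acc : Nat) :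
    PySem.Chars.count.go sub fuel l acc ≤ acc + fuel := by
  induction fuel generalizing l acc with
  | zero => rw [PySem.Chars.count.go.eq_def]; simp
  | succ fuel ih =>
    cases l with
    | nil => rw [PySem.Chars.count.go.eq_def]; simp
    | cons h t =>
      have hgo : PySem.Chars.count.go sub (fuel+1) (h::t) acc
          = if sub.isPrefixOf (h::t) = true then PySem.Chars.count.go sub fuel (List.drop sub.length (h::t)) (acc+1)
            else PySem.Chars.count.go sub fuel t acc := rfl
      rw [hgo]
      split
      · exact le_trans (ih _ _) (by omega)
      · exact le_trans (ih _ _) (by omega)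

theorem pv_count_le (s sub : List Char) : PySem.Chars.count s sub ≤ s.length + 1 := by
  unfold PySem.Chars.count
  split
  · exact le_refl _
  · exact le_trans (pv_count_go_le sub s.length s 0) (by omega)

theorem pv_insertBy_append_left {α : Type} (before : α → α → Bool) (x : α) (p s : List α)
    (h : ∀ y ∈ p, before x y = false) :
    PySem.List.insertBy before x (p ++ s) = p ++ PySem.List.insertBy before x s := by

  induction p with
  | nil => simp
  | cons y ys ih =>
    have hy : before x y = false := h y (by simp)
    simp only [List.cons_append, PySem.List.insertBy.eq_2, hy]
    simp [ih (fun z hz => h z (by simp [hz]))]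

theorem pv_insertBy_all_before {α : Type} (before : α → α → Bool) (x : α) (ys : List α)
    (h : ∀ y ∈ ys, before x y = true) :
    PySem.List.insertBy before x ys = x :: ys := by
  cases ys with
  | nil => simp [PySem.List.insertBy.eq_1]
  | cons y t => simp [PySem.List.insertBy.eq_2, h y (by simp)]

theorem pv_insertBy_congr {α : Type} (b1 b2 : α → α → Bool) (x : α) (ys : List α)
    (h : ∀ y ∈ ys, b1 x y = b2 x y) :
    PySem.List.insertBy b1 x ys = PySem.List.insertBy b2 x ys := by
  induction ys with
  | nil => simp [PySem.List.insertBy.eq_1]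
  | cons y t ih =>
    simp only [PySem.List.insertBy.eq_2, h y (by simp)]
    rw [ih (fun z hz => h z (by simp [hz]))]

theorem pv_sorted_rev_natCast {α : Type} (l : List α) (key : α → Nat) :
    PySem.List.sorted l (fun x => (key x : Int)) true = PySem.List.sorted l key true := by
  rw [PySem.List.sorted_rev_eq_foldl_insertBy, PySem.List.sorted_rev_eq_foldl_insertBy]
  have : (fun (a b : α) => decide ((key b : Int) < (key a : Int)))
       = (fun (a b : α) => decide (key b < key a)) := by
    funext a b; simp
  rw [this]

theorem pv_sorted_rev_congr {α κ : Type} [LinearOrder κ] (l : List α) (key1 key2 : α → κ)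
    (h : ∀ x ∈ l, key1 x = key2 x) :
    PySem.List.sorted l key1 true = PySem.List.sorted l key2 true := by
  induction l using List.reverseRecOn with
  | nil => rfl
  | append_singleton l x ih =>
    rw [PySem.List.sorted_rev_eq_foldl_insertBy, PySem.List.sorted_rev_eq_foldl_insertBy,
        List.foldl_append, List.foldl_append]
    simp only [List.foldl_cons, List.foldl_nil]
    rw [← PySem.List.sorted_rev_eq_foldl_insertBy, ← PySem.List.sorted_rev_eq_foldl_insertBy,
        ih (fun z hz => h z (by simp [hz]))]
    apply pv_insertBy_congr
    intro y hy
    have hyl : y ∈ l := by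
      rw [PySem.List.mem_sorted] at hy; exact hy
    rw [h x (by simp), h y (by simp [hyl])]

theorem pv_getD_foldl_insert (texto : String) (l : List String) (d : PySem.Dict String Int) (v : String) :
    ((l.foldl (fun d i => d.insert i ((PySem.Str.count texto i : Int))) d).getD v 0)
      = if v ∈ l then (PySem.Str.count texto v : Int) else d.getD v 0 := by
  induction l generalizing d with
  | nil => simp
  | cons q t ih =>
    simp only [List.foldl_cons, ih, PySem.Dict.getD_insert]
    by_cases hvt : v ∈ t
    · simp [hvt]
    · by_cases hvq : v = q
      · subst hvq; simp [hvt]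
      · simp [hvt, hvq]

theorem pv_set_map_range {β : Type} (f : Nat → β) (m i : Nat) (v : β) (_hi : i < m) :
    ((List.range m).map f).set i v = (List.range m).map (fun c => if c = i then v else f c) := by
  apply List.ext_getElem
  · simp
  · intro j h1 h2
    simp only [List.length_set, List.length_map, List.length_range] at h1
    rw [List.getElem_set]
    simp only [List.getElem_map, List.getElem_range]
    by_cases hj : i = j
    · simp [hj]
    · rw [if_neg hj, if_neg (fun h => hj (Eq.symm h))]

theorem pv_buckets_invariant (texto : String) (n : Nat) (L : List String) (f : Nat → List String)
    (h : ∀ q ∈ L, PySem.Str.count texto q < n + 2) :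
    L.foldl (fun bs q => bs.set (PySem.Str.count texto q) (bs.getD (PySem.Str.count texto q) [] ++ [q]))
        ((List.range (n + 2)).map f)
      = (List.range (n + 2)).map (fun c => f c ++ L.filter (fun q => PySem.Str.count texto q == c)) := by
  induction L generalizing f with
  | nil => simp
  | cons q t ih =>
    have hq : PySem.Str.count texto q < n + 2 := h q (by simp)
    simp only [List.foldl_cons]
    rw [PySem.List.getD_map_range _ _ _ _ hq, pv_set_map_range _ _ _ _ hq]
    rw [ih _ (fun z hz => h z (List.mem_cons_of_mem _ hz))]
    apply List.map_congr_left
    intro c hc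
    simp only [List.filter_cons, beq_iff_eq]
    split_ifs with h1 h2 <;> simp_all [List.append_assoc]

theorem pv_sorted_rev_eq_buckets {α : Type} (l : List α) (key : α → Nat) (n : Nat)
    (h : ∀ x ∈ l, key x ≤ n) :
    PySem.List.sorted l key true
      = ((List.range (n + 1)).reverse).flatMap (fun c => l.filter (fun x => key x == c)) := by
  induction l using List.reverseRecOn with
  | nil => simp [PySem.List.sorted]
  | append_singleton l x ih =>
    have hx : key x ≤ n := h x (by simp)
    -- split the descending range at key x
    have hsplit : (List.range (n + 1)).reverse
        = (List.range' (key x + 1) (n - key x)).reverse ++ key x :: (List.range (key x)).reverse := by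
      have h1 : List.range (n + 1) = List.range (key x) ++ key x :: List.range' (key x + 1) (n - key x) := by
        rw [List.range_eq_range', List.range_eq_range']
        have h2 : key x :: List.range' (key x + 1) (n - key x) = List.range' (key x) (n - key x + 1) := by
          rw [List.range'_succ]
        have h3 := List.range'_append_1 (s := 0) (m := key x) (n := n - key x + 1)
        simp only [Nat.zero_add] at h3
        rw [h2, h3]
        congr 1
        omega
      rw [h1]
      simp
    -- LHS step
    rw [PySem.List.sorted_rev_eq_foldl_insertBy, List.foldl_append, List.foldl_cons, List.foldl_nil,
        ← PySem.List.sorted_rev_eq_foldl_insertBy, ih (fun z hz => h z (by simp [hz]))]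
    rw [hsplit]
    set K := key x with hK
    set G : Nat → List α := fun c => l.filter (fun y => key y == c) with hG
    -- both flatMaps split into three blocks
    rw [List.flatMap_append, List.flatMap_cons, List.flatMap_append, List.flatMap_cons]
    -- the new element's filters: equal to old ones except at bucket K
    have hfiltA : ∀ c, ((l ++ [x]).filter (fun y => key y == c)) = G c ++ (if K = c then [x] else []) := by
      intro c
      rw [List.filter_append]
      simp only [hG, List.filter_cons, List.filter_nil, beq_iff_eq, hK]
    have hA : ((List.range' (K + 1) (n - K)).reverse).flatMap (fun c => (l ++ [x]).filter (fun y => key y == c))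
        = ((List.range' (K + 1) (n - K)).reverse).flatMap G := by
      apply List.flatMap_congr
      intro c hc
      rw [hfiltA c, if_neg (by
        simp only [List.mem_reverse, List.mem_range'_1] at hc
        omega)]
      simp
    have hB : ((List.range K).reverse).flatMap (fun c => (l ++ [x]).filter (fun y => key y == c))
        = ((List.range K).reverse).flatMap G := by
      apply List.flatMap_congr
      intro c hc
      rw [hfiltA c, if_neg (by
        simp only [List.mem_reverse, List.mem_range] at hc
        omega)]
      simp
    rw [hA, hB, hfiltA K, if_pos rfl]
    -- now move the insert through the prefix and before the suffix
    have hpre : ∀ y ∈ ((List.range' (K + 1) (n - K)).reverse).flatMap G ++ G K,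
        (fun a b => decide (key b < key a)) x y = false := by
      intro y hy
      rcases List.mem_append.mp hy with hy | hy
      · obtain ⟨c, hc, hyc⟩ := List.mem_flatMap.mp hy
        simp only [List.mem_reverse, List.mem_range'_1] at hc
        have : key y = c := by
          have := List.of_mem_filter hyc
          simpa using this
        simp only [decide_eq_false_iff_not, not_lt]
        omega
      · have : key y = K := by
          have := List.of_mem_filter hy
          simpa using this
        simp [this, hK]
    have hsuf : ∀ y ∈ ((List.range K).reverse).flatMap G,
        (fun a b => decide (key b < key a)) x y = true := by
      intro y hy
      obtain ⟨c, hc, hyc⟩ := List.mem_flatMap.mp hy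
      simp only [List.mem_reverse, List.mem_range] at hc
      have : key y = c := by
        have := List.of_mem_filter hyc
        simpa using this
      simp only [decide_eq_true_eq]
      omega
    rw [← List.append_assoc] at *
    rw [show ((List.range' (K + 1) (n - K)).reverse).flatMap G ++ G K ++ ((List.range K).reverse).flatMap G
          = (((List.range' (K + 1) (n - K)).reverse).flatMap G ++ G K) ++ ((List.range K).reverse).flatMap G from by
        simp [List.append_assoc]]
    rw [pv_insertBy_append_left _ _ _ _ hpre, pv_insertBy_all_before _ _ _ hsuf]
    simp [List.append_assoc]

-- assembly: both programs reduce to the same descending bucket concatenation.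
theorem pv_main (texto : String) (queries : List String) (k : Int) :
    calcula_top_ocorrencias_de_queries texto queries k
      = calcula_top_ocorrencias_de_queries_alt texto queries k := by
  unfold calcula_top_ocorrencias_de_queries calcula_top_ocorrencias_de_queries_alt
  set n := texto.toList.length with hn
  set key : String → Nat := fun q => PySem.Str.count texto q with hkey
  set d : PySem.Dict String Int :=
    queries.foldl (fun d i => d.insert i ((PySem.Str.count texto i : Int))) PySem.Dict.empty with hd
  show PySem.List.slice (PySem.List.sorted d.keys (fun i => d.getD i 0) true) (some 0) (some k)
     = PySem.List.slice (List.foldl (fun acc b => acc ++ b) []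
         (((PySem.List.dedup queries).foldl
             (fun bs q => bs.set (PySem.Str.count texto q) (bs.getD (PySem.Str.count texto q) [] ++ [q]))
             (List.replicate (n + 2) ([] : List String))).reverse)) (some 0) (some k)
  have hkeys : d.keys = PySem.Set.ofList queries := by
    rw [hd, PySem.Dict.keys_foldl_insert]
    rw [show PySem.Dict.empty.keys = ([] : List String) from rfl]
    rw [PySem.Set.update_eq_foldl]; rfl
  have hbound : ∀ q ∈ PySem.Set.ofList queries, key q ≤ n + 1 := by
    intro q hq
    show PySem.Str.count texto q ≤ n + 1
    rw [PySem.Str.count_eq]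
    exact pv_count_le _ _
  have hsortA : PySem.List.sorted d.keys (fun i => d.getD i 0) true
      = ((List.range (n + 1 + 1)).reverse).flatMap
          (fun c => (PySem.Set.ofList queries).filter (fun q => key q == c)) := by
    rw [hkeys]
    rw [pv_sorted_rev_congr (PySem.Set.ofList queries) (fun i => d.getD i 0)
          (fun q => ((key q : Nat) : Int))
          (by
            intro q hq
            show d.getD q 0 = ((key q : Nat) : Int)
            rw [hd, pv_getD_foldl_insert, if_pos ((PySem.Set.mem_ofList queries q).mp hq)])]
    rw [pv_sorted_rev_natCast]
    exact pv_sorted_rev_eq_buckets (PySem.Set.ofList queries) key (n + 1) hbound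
  have hbuckets :
      (PySem.List.dedup queries).foldl
          (fun bs q => bs.set (PySem.Str.count texto q) (bs.getD (PySem.Str.count texto q) [] ++ [q]))
          (List.replicate (n + 2) ([] : List String))
        = (List.range (n + 2)).map (fun c => (PySem.Set.ofList queries).filter (fun q => key q == c)) := by
    rw [show List.replicate (n + 2) ([] : List String)
          = (List.range (n + 2)).map (fun _ => ([] : List String)) from by simp [List.map_const']]
    rw [show PySem.List.dedup queries = PySem.Set.ofList queries from rfl]
    rw [pv_buckets_invariant texto n (PySem.Set.ofList queries) (fun _ => [])
          (fun q _ => by rw [PySem.Str.count_eq]; have := pv_count_le texto.toList q.toList; omega)]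
    simp only [List.nil_append]
    rfl
  rw [hsortA, hbuckets, PySem.List.foldl_append_eq_flatten, List.nil_append,
      ← List.map_reverse, List.flatMap_def]

-- ===== VERDICT (by name: the statement is the Claim_ definition above) =====
theorem calcula_top_ocorrencias_de_queries_spec : Claim_equal_calcula_top_ocorrencias_de_queries := by
  intro texto queries k _
  unfold Spec_calcula_top_ocorrencias_de_queries
  exact pv_main texto queries k
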